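-- pv_equiv track=rewrite | github.com/Gin-G/nfl-data-py | nfl_ai_work/utils.py | identify_sleepers
-- ===== SOURCE A (Python) =====
-- def identify_sleepers(predictions, adp_data, threshold=20):
--     """
--     Identify potential sleeper picks based on predictions vs ADP.
--
--     :param predictions: dict, predicted fantasy points for players
--     :param adp_data: dict, average draft position for players
--     :param threshold: int, threshold for ADP difference
--     :return: list of potential sleeper picks
--     """
--     sleepers = []
--     for player, points in predictions.items():
--         if player in adp_data:
--             predicted_rank = sorted(predictions, key=predictions.get, reverse=True).index(player) + 1
--             adp_rank = adp_data[player]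
--             if adp_rank - predicted_rank > threshold:
--                 sleepers.append((player, predicted_rank, adp_rank))
--     return sleepers
-- ===== SOURCE B (Python) =====
-- def identify_sleepers(predictions, adp_data, threshold=20):
--     """Single-sort re-implementation: sort the players by predicted points once,
--     build a rank table from the enumeration, then select the sleepers in one
--     comprehension (A re-sorts the whole dict for every player)."""
--     order = sorted(predictions, key=predictions.get, reverse=True)
--     rank = {player: i + 1 for i, player in enumerate(order)}
--     return [(p, rank[p], adp_data[p])
--             for p in predictions
--             if p in adp_data and adp_data[p] - rank[p] > threshold]
-- ===== Notes on version B (the rewrite author's own statement) =====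
-- stated objective: faster
-- what changed: A re-sorts the whole predictions dict and calls .index for every player; B sorts once, precomputes a player-to-rank dict from the enumeration of that single sorted order, and selects the sleepers in one comprehension.
import Mathlib
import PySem

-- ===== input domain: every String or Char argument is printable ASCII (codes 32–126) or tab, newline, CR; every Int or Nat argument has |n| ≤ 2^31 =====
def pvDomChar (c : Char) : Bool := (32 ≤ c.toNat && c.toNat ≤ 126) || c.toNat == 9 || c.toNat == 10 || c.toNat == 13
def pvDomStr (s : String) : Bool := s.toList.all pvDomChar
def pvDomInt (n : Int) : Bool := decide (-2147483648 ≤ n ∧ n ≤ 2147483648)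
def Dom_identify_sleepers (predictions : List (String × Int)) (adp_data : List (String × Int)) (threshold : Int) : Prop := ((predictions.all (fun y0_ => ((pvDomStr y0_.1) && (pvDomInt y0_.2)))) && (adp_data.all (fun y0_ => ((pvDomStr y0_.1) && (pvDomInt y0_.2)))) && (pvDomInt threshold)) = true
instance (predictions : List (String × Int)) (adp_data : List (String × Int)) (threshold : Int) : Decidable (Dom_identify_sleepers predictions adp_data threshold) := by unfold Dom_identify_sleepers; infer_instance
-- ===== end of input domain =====

-- B sorts the predictions once and precomputes a rank table, where A re-sorts the whole
-- dict for every player; same selected tuples in the same order.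

-- ===== PORT A =====
def identify_sleepers (predictions : List (String × Int)) (adp_data : List (String × Int)) (threshold : Int) : List (String × Int × Int) :=
  let preds := PySem.Dict.ofList predictions
  let adp := PySem.Dict.ofList adp_data
  preds.items.foldl
    (fun sleepers pp =>
      if adp.contains pp.1 then
        -- sorted(predictions, key=predictions.get, reverse=True).index(player) + 1:
        -- the key list stably sorted by predictions.get is the items list stably sorted by
        -- value, projected to the keys; keys are unique, so the index of the player in that
        -- key list is the index of its (player, points) item in the sorted items (exact);
        -- the player is always present, so .index never raises and getD 0 is never taken.
        let predicted_rank : Int :=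
          ((PySem.List.index? (PySem.List.sorted preds.items (fun q => q.2) true) pp).getD 0 : Int) + 1
        let adp_rank := adp.getD pp.1 0   -- adp_data[player]; guarded by the membership test (exact)
        if adp_rank - predicted_rank > threshold then sleepers ++ [(pp.1, predicted_rank, adp_rank)]
        else sleepers
      else sleepers) []

-- ===== PORT B =====
def identify_sleepers_alt (predictions : List (String × Int)) (adp_data : List (String × Int)) (threshold : Int) : List (String × Int × Int) :=
  let preds := PySem.Dict.ofList predictions
  let adp := PySem.Dict.ofList adp_data
  -- order = sorted(predictions, key=predictions.get, reverse=True): keys are unique, so the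
  -- stably sorted key list is the items list stably sorted by value, projected to keys (exact)
  let order := (PySem.List.sorted preds.items (fun q => q.2) true).map Prod.fst
  -- rank = {player: i + 1 for i, player in enumerate(order)}
  let rank := PySem.Dict.ofList ((PySem.List.enumerate order).map (fun ip => (ip.2, ip.1 + 1)))
  -- [(p, rank[p], adp_data[p]) for p in predictions if p in adp_data and … > threshold]:
  -- the lookups are guarded by the short-circuit membership test (and p is always in rank),
  -- so the getD defaults are never taken (exact)
  preds.keys.filterMap (fun p =>
    if adp.contains p ∧ adp.getD p 0 - rank.getD p 0 > threshold then
      some (p, rank.getD p 0, adp.getD p 0)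
    else none)

-- ===== PRECONDITION & SPEC =====
def Spec_identify_sleepers (predictions : List (String × Int)) (adp_data : List (String × Int)) (threshold : Int) (out : List (String × Int × Int)) : Prop := out = identify_sleepers_alt predictions adp_data threshold
instance (predictions : List (String × Int)) (adp_data : List (String × Int)) (threshold : Int) (out : List (String × Int × Int)) : Decidable (Spec_identify_sleepers predictions adp_data threshold out) := by unfold Spec_identify_sleepers; infer_instance

-- ===== CLAIM (what is proved, stated in full; the proofs are below) =====
def Claim_equal_identify_sleepers : Prop := ∀ (predictions : List (String × Int)) (adp_data : List (String × Int)) (threshold : Int), Dom_identify_sleepers predictions adp_data threshold → Spec_identify_sleepers predictions adp_data threshold (identify_sleepers predictions adp_data threshold)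

-- ===== LEMMAS AND PROOFS =====

-- an append-or-skip foldl is the filterMap of its per-element option
theorem foldl_eq_filterMap {α β : Type} (f : List β → α → List β) (g : α → Option β) :
    ∀ (l : List α), (∀ x ∈ l, ∀ acc, f acc x = acc ++ (g x).toList) →
      ∀ acc, l.foldl f acc = acc ++ l.filterMap g := by
  intro l
  induction l with
  | nil => intro _ acc; simp
  | cons x t ih =>
      intro h acc
      simp only [List.foldl_cons, List.filterMap_cons]
      rw [h x List.mem_cons_self, ih (fun y hy => h y (List.mem_cons_of_mem _ hy))]
      cases hg : g x <;> simp

-- with unique first components, a pair's index is its key's index in the projection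
theorem index?_map_fst (pp : String × Int) :
    ∀ (S : List (String × Int)), (S.map Prod.fst).Nodup → pp ∈ S →
      PySem.List.index? S pp = PySem.List.index? (S.map Prod.fst) pp.1 := by
  intro S
  induction S with
  | nil => intro _ h; simp at h
  | cons b T ih =>
      intro hnd hpp
      rw [List.map_cons, List.nodup_cons] at hnd
      by_cases hb : b = pp
      · subst hb
        rw [PySem.List.index?_cons_self, List.map_cons, PySem.List.index?_cons_self]
      · have hppT : pp ∈ T := (List.mem_cons.mp hpp).resolve_left (fun h => hb h.symm)
        have hb1 : b.1 ≠ pp.1 := by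
          intro h
          exact hnd.1 (h ▸ List.mem_map_of_mem hppT)
        rw [PySem.List.index?_cons_of_ne _ hb, List.map_cons,
            PySem.List.index?_cons_of_ne _ hb1, ih hnd.2 hppT]

-- proof-side name for B's rank table (definitionally the term in identify_sleepers_alt)
def rankT (items : List (String × Int)) : PySem.Dict String Int :=
  PySem.Dict.ofList
    ((PySem.List.enumerate ((PySem.List.sorted items (fun q => q.2) true).map Prod.fst)).map
      (fun ip => (ip.2, ip.1 + 1)))

-- B's precomputed rank table agrees with A's index-in-the-stable-sort rank
theorem rank_getD (items : List (String × Int)) (hnd : (items.map Prod.fst).Nodup)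
    (pp : String × Int) (hpp : pp ∈ items) :
    (rankT items).getD pp.1 0
      = ((PySem.List.index? (PySem.List.sorted items (fun q => q.2) true) pp).getD 0 : Int) + 1 := by
  unfold rankT
  set T := PySem.List.sorted items (fun q => q.2) true with hT
  have hperm : T.Perm items := PySem.List.sorted_perm items (fun q => q.2) true
  have hndT : (T.map Prod.fst).Nodup := ((hperm.map Prod.fst).nodup_iff).mpr hnd
  have hppT : pp ∈ T := (PySem.List.mem_sorted _ _ _ _).mpr hpp
  have hsome : (PySem.List.index? T pp).isSome := (PySem.List.index?_isSome_iff _ _).mpr hppT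
  obtain ⟨k, hk⟩ := Option.isSome_iff_exists.mp hsome
  have hk1 : PySem.List.index? (T.map Prod.fst) pp.1 = some k := by
    rw [← index?_map_fst pp T hndT hppT]; exact hk
  obtain ⟨hklt, hget, -⟩ := PySem.List.getElem_of_index?_eq_some hk1
  set L := (PySem.List.enumerate (T.map Prod.fst)).map (fun ip : Int × String => (ip.2, ip.1 + 1))
    with hL
  have hLfst : L.map Prod.fst = T.map Prod.fst := by
    rw [hL, List.map_map]
    exact PySem.List.map_snd_enumerate (T.map Prod.fst) 0
  have hitems : (PySem.Dict.ofList L).items = L := by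
    show (L.foldl (fun d p => d.insert p.1 p.2) PySem.Dict.empty).items = L
    have := PySem.Dict.items_foldl_insert_fresh L (fun p => p.1) (fun p => p.2)
      PySem.Dict.empty (fun a _ => PySem.Dict.contains_empty (ν := Int) a) (hLfst ▸ hndT)
    simpa using this
  have hmem : (pp.1, (k : Int) + 1) ∈ (PySem.Dict.ofList L).items := by
    rw [hitems, hL]
    have : ((0 : Int) + (k : Int), (T.map Prod.fst)[k]) ∈ PySem.List.enumerate (T.map Prod.fst) 0 := by
      rw [PySem.List.mem_enumerate_iff]
      exact ⟨k, hklt, rfl⟩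
    have hmem' := List.mem_map_of_mem (f := fun ip : Int × String => (ip.2, ip.1 + 1)) this
    simpa [hget] using hmem'
  have hkeys : (PySem.Dict.ofList L).keys.Nodup := PySem.Dict.nodup_keys_ofList L
  rw [PySem.Dict.getD_of_mem_items _ hmem hkeys, hk]
  simp

-- the whole equality, phrased over the two dicts
theorem main_eq (preds adp : PySem.Dict String Int) (threshold : Int)
    (hnd : (preds.items.map Prod.fst).Nodup) :
    preds.items.foldl
      (fun sleepers pp =>
        if adp.contains pp.1 then
          let predicted_rank : Int :=
            ((PySem.List.index? (PySem.List.sorted preds.items (fun q => q.2) true) pp).getD 0 : Int) + 1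
          let adp_rank := adp.getD pp.1 0
          if adp_rank - predicted_rank > threshold then sleepers ++ [(pp.1, predicted_rank, adp_rank)]
          else sleepers
        else sleepers) []
      = preds.keys.filterMap (fun p =>
          if adp.contains p ∧ adp.getD p 0 - (rankT preds.items).getD p 0 > threshold then
            some (p, (rankT preds.items).getD p 0, adp.getD p 0)
          else none) := by
  rw [show preds.keys = preds.items.map Prod.fst from rfl, List.filterMap_map]
  refine (foldl_eq_filterMap _ _ preds.items ?_ []).trans (List.nil_append _)
  intro pp hpp acc
  simp only [Function.comp_apply]
  have hrank := rank_getD preds.items hnd pp hpp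
  rw [hrank]
  by_cases hc : adp.contains pp.1 = true
  · simp only [hc, if_true, true_and]
    split_ifs with h2 <;> simp
  · simp [hc]

-- ===== VERDICT (by name: the statement is the Claim_ definition above) =====
theorem identify_sleepers_spec : Claim_equal_identify_sleepers := by
  intro predictions adp_data threshold _dom
  unfold Spec_identify_sleepers identify_sleepers identify_sleepers_alt
  exact main_eq (PySem.Dict.ofList predictions) (PySem.Dict.ofList adp_data) threshold
    (PySem.Dict.nodup_keys_ofList predictions)
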